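-- pv_equiv track=rewrite | github.com/kahbodaeini/Bioinformatic | 4/2/main2.py | gene_ID
-- ===== SOURCE A (Python) =====
-- def gene_ID(str, k):
--     dictionary = {0: 'A', 1: 'C', 2: 'G', 3: 'T'}
--     if k == 1:
--         return dictionary[str]
--     q, r = str // 4, str % 4
--     gene_number = dictionary[r]
--     value = gene_ID(q, k - 1) + gene_number
--     return value
-- ===== SOURCE B (Python) =====
-- def gene_ID(str, k):
--     dictionary = {0: 'A', 1: 'C', 2: 'G', 3: 'T'}
--     n, result = str, ''
--     for _ in range(k - 1):
--         result = dictionary[n % 4] + result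
--         n //= 4
--     return dictionary[n] + result
-- ===== Notes on version B (the rewrite author's own statement) =====
-- stated objective: alternative
-- what changed: Replaced the most-significant-first recursion with an explicit loop that prepends the digit characters least-significant-first while dividing by 4.
import Mathlib
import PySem

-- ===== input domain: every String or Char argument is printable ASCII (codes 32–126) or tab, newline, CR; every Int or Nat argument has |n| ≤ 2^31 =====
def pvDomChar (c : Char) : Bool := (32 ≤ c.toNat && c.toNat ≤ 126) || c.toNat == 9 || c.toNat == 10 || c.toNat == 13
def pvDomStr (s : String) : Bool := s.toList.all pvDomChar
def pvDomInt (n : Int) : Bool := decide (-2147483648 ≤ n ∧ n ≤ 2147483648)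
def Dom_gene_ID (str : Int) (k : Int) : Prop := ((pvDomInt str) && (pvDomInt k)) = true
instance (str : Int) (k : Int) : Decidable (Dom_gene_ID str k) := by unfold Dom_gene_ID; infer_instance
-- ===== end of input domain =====

-- B rewrites A's recursion as an explicit least-significant-first loop (same cost, different decomposition).

-- ===== PORT A =====
-- dictionary = {0:'A',1:'C',2:'G',3:'T'}; lookup of any other key is a KeyError in
-- Python (excluded by Pre_); "" here is only a totalisation placeholder for that case.
def pyDict4 (n : Int) : String :=
  if n = 0 then "A" else if n = 1 then "C" else if n = 2 then "G" else if n = 3 then "T" else ""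

-- A's recursion, fuel-indexed for totality; fuel = k.toNat suffices on Pre_ (k ≥ 1).
def geneAux (str : Int) (k : Int) : Nat → String
  | 0 => ""
  | f + 1 =>
    if k = 1 then pyDict4 str
    else geneAux (PySem.Int.floordiv str 4) (k - 1) f ++ pyDict4 (PySem.Int.mod str 4)

def gene_ID (str : Int) (k : Int) : String := geneAux str k k.toNat

-- ===== PORT B =====
-- one loop iteration: result = dictionary[n % 4] + result; n //= 4
def geneStep (p : Int × String) : Int × String :=
  (PySem.Int.floordiv p.1 4, pyDict4 (PySem.Int.mod p.1 4) ++ p.2)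

def gene_ID_alt (str : Int) (k : Int) : String :=
  let p := (PySem.List.pyRange 0 (k - 1) 1).foldl (fun p _ => geneStep p) (str, "")
  pyDict4 p.1 ++ p.2

-- ===== PRECONDITION & SPEC =====
-- A raises RecursionError for k < 1 and KeyError when the leading base-4 digit is not
-- in {0,1,2,3} (negative str, or str ≥ 4^k); Pre_ admits exactly the returning inputs.
def Pre_gene_ID (str : Int) (k : Int) : Prop := 1 ≤ k ∧ 0 ≤ str ∧ str < 4 ^ k.toNat
instance (str : Int) (k : Int) : Decidable (Pre_gene_ID str k) := by unfold Pre_gene_ID; infer_instance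
def pvWitness_gene_ID : Int × Int := (11, 3)

def Spec_gene_ID (str : Int) (k : Int) (out : String) : Prop := out = gene_ID_alt str k
instance (str : Int) (k : Int) (out : String) : Decidable (Spec_gene_ID str k out) := by unfold Spec_gene_ID; infer_instance

-- ===== CLAIM (what is proved, stated in full; the proofs are below) =====
def Claim_equal_gene_ID : Prop := ∀ (str : Int) (k : Int), Dom_gene_ID str k → Pre_gene_ID str k → Spec_gene_ID str k (gene_ID str k)

-- ===== LEMMAS AND PROOFS =====
theorem foldl_const_step (l : List Int) (p : Int × String) :
    l.foldl (fun p _ => geneStep p) p = geneStep^[l.length] p := by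
  induction l generalizing p with
  | nil => rfl
  | cons x xs ih => simp [List.foldl, ih, Function.iterate_succ_apply]

theorem geneAux_eq_iterate (m : Nat) : ∀ (str : Int) (s : String),
    geneAux str ((m : Int) + 1) (m + 1) ++ s =
      pyDict4 (geneStep^[m] (str, s)).1 ++ (geneStep^[m] (str, s)).2 := by
  induction m with
  | zero => intro str s; simp [geneAux]
  | succ m ih =>
    intro str s
    have hk : ((m : Int) + 1 + 1) ≠ 1 := by omega
    have h1 : (m : Int) + 1 + 1 - 1 = (m : Int) + 1 := by ring
    rw [geneAux]
    push_cast
    rw [if_neg hk, h1, String.append_assoc,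
      ih (PySem.Int.floordiv str 4) (pyDict4 (PySem.Int.mod str 4) ++ s),
      Function.iterate_succ_apply]
    rfl

theorem gene_ID_spec : Claim_equal_gene_ID := by
  intro str k _ hpre
  obtain ⟨hk, -, -⟩ := hpre
  unfold Spec_gene_ID gene_ID gene_ID_alt
  obtain ⟨m, hm⟩ : ∃ m : Nat, k = (m : Int) + 1 :=
    ⟨(k - 1).toNat, by omega⟩
  subst hm
  have hto : ((m : Int) + 1).toNat = m + 1 := by omega
  have hr : ((m : Int) + 1 - 1 - 0).toNat = m := by omega
  rw [hto, foldl_const_step, PySem.List.length_pyRange_one, hr]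
  have := geneAux_eq_iterate m str ""
  simpa using this
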